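-- pv_equiv track=rewrite | github.com/sumitsaraswat362/clinical-trial-auditor | server/app.py | trim_actions
-- ===== SOURCE A (Python) =====
-- def trim_actions(actions, traces, max_steps):
--     """Ensure we don't exceed the step budget."""
--     if len(actions) <= max_steps:
--         return actions, traces
--     # Keep investigations/distributions, trim flags from middle
--     non_flags = [(i,a,t) for i,(a,t) in enumerate(zip(actions,traces)) if a.get("action_type") not in ("flag_error",)]
--     flags = [(i,a,t) for i,(a,t) in enumerate(zip(actions,traces)) if a.get("action_type") == "flag_error"]
--     report = [(i,a,t) for i,(a,t) in enumerate(zip(actions,traces)) if a.get("action_type") == "submit_report"]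
--
--     # Remove report from non_flags to add back at end
--     non_flags_no_report = [x for x in non_flags if x[1].get("action_type") != "submit_report"]
--
--     budget = max_steps - len(non_flags_no_report) - len(report)
--     trimmed_flags = flags[:max(0, budget)]
--
--     combined = non_flags_no_report + trimmed_flags + report
--     combined.sort(key=lambda x: x[0])
--
--     return [a for _,a,_ in combined], [t for _,_,t in combined]
-- ===== SOURCE B (Python) =====
-- def trim_actions(actions, traces, max_steps):
--     """Ensure we don't exceed the step budget."""
--     if len(actions) <= max_steps:
--         return actions, traces
--     # Budget for flag_error actions = max_steps minus the non-flag actions we always keep.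
--     budget = max_steps - sum(1 for a, _ in zip(actions, traces) if a.get("action_type") != "flag_error")
--     out_actions, out_traces, kept = [], [], 0
--     for a, t in zip(actions, traces):
--         if a.get("action_type") != "flag_error":
--             out_actions.append(a)
--             out_traces.append(t)
--         elif kept < budget:
--             out_actions.append(a)
--             out_traces.append(t)
--             kept += 1
--     return out_actions, out_traces
-- ===== Notes on version B (the rewrite author's own statement) =====
-- stated objective: simpler
-- what changed: Replaced the three-way index-tagged partition, budget arithmetic over two of the parts, list concatenation and final sort-by-index with a precomputed non-flag count and one forward pass that keeps every non-flag item and the first budget flag items in place, so no enumeration, partitioning or sorting is needed.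
import Mathlib
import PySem

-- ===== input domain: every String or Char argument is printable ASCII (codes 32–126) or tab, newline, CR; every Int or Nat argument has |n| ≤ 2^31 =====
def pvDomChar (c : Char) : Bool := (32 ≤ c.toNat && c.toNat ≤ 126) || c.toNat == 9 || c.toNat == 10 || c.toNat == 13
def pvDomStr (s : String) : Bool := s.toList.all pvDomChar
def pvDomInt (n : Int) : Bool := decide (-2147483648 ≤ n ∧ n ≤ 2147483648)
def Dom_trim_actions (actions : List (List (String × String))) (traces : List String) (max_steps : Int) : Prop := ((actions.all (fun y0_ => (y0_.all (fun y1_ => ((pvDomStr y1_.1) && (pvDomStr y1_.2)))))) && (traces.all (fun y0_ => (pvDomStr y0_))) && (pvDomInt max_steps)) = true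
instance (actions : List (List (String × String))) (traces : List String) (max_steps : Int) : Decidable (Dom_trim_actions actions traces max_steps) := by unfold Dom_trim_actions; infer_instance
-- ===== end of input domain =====

-- B replaces A's three-way partition + budget arithmetic + sort-by-index with one forward
-- pass keeping non-flags and the first `budget` flags in place (objective: simpler).


-- shared helper: a.get("action_type") on the association-list dict (first match, None = none)
def pvGetAT (a : List (String × String)) : Option String := List.lookup "action_type" a

-- ===== PORT A =====
def trim_actions (actions : List (List (String × String))) (traces : List String) (max_steps : Int) : (List (List (String × String))) × List String :=
  if (actions.length : Int) ≤ max_steps then (actions, traces)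
  else
    let e := PySem.List.enumerate (actions.zip traces) 0
    let non_flags := e.filter (fun q => !(pvGetAT q.2.1 == some "flag_error"))
    let flags := e.filter (fun q => pvGetAT q.2.1 == some "flag_error")
    let report := e.filter (fun q => pvGetAT q.2.1 == some "submit_report")
    let non_flags_no_report := non_flags.filter (fun q => !(pvGetAT q.2.1 == some "submit_report"))
    let budget : Int := max_steps - (non_flags_no_report.length : Int) - (report.length : Int)
    let trimmed_flags := PySem.List.slice flags none (some (max 0 budget))
    let combined := PySem.List.sorted (non_flags_no_report ++ trimmed_flags ++ report) (fun q => q.1) false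
    (combined.map (fun q => q.2.1), combined.map (fun q => q.2.2))

-- ===== PORT B =====
def trim_actions_alt (actions : List (List (String × String))) (traces : List String) (max_steps : Int) : (List (List (String × String))) × List String :=
  if (actions.length : Int) ≤ max_steps then (actions, traces)
  else
    let budget : Int := max_steps - (((actions.zip traces).filter (fun p => !(pvGetAT p.1 == some "flag_error"))).length : Int)
    let st := (actions.zip traces).foldl
      (fun (st : List (List (String × String)) × List String × Int) p =>
        if !(pvGetAT p.1 == some "flag_error") then (st.1 ++ [p.1], st.2.1 ++ [p.2], st.2.2)
        else if st.2.2 < budget then (st.1 ++ [p.1], st.2.1 ++ [p.2], st.2.2 + 1)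
        else st)
      ([], [], (0 : Int))
    (st.1, st.2.1)

-- ===== PRECONDITION & SPEC =====
def Spec_trim_actions (actions : List (List (String × String))) (traces : List String) (max_steps : Int) (out : (List (List (String × String))) × List String) : Prop := out = trim_actions_alt actions traces max_steps
instance (actions : List (List (String × String))) (traces : List String) (max_steps : Int) (out : (List (List (String × String))) × List String) : Decidable (Spec_trim_actions actions traces max_steps out) := by unfold Spec_trim_actions; infer_instance

-- ===== CLAIM (what is proved, stated in full; the proofs are below) =====
def Claim_equal_trim_actions : Prop := ∀ (actions : List (List (String × String))) (traces : List String) (max_steps : Int), Dom_trim_actions actions traces max_steps → Spec_trim_actions actions traces max_steps (trim_actions actions traces max_steps)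

-- ===== LEMMAS AND PROOFS =====

-- "keep every non-flag, and flags only while the remaining budget k is positive"
def pickL {α : Type} (p : α → Bool) : List α → Int → List α
  | [], _ => []
  | x :: xs, k =>
    if p x then (if 0 < k then x :: pickL p xs (k - 1) else pickL p xs k)
    else x :: pickL p xs k

theorem pickL_perm {α : Type} (p : α → Bool) (l : List α) (k : Int) :
    (pickL p l k).Perm (l.filter (fun x => !p x) ++ (l.filter p).take k.toNat) := by
  induction l generalizing k with
  | nil => simp [pickL]
  | cons x xs ih =>
    by_cases h : p x = true
    · by_cases hk : 0 < k
      · have hnf : (x :: xs).filter (fun x => !p x) = xs.filter (fun x => !p x) := by simp [h]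
        have hf : (x :: xs).filter p = x :: xs.filter p := by simp [h]
        have hkt : k.toNat = (k - 1).toNat + 1 := by omega
        rw [pickL, if_pos h, if_pos hk, hnf, hf, hkt, List.take_succ_cons]
        exact ((ih (k - 1)).cons x).trans List.perm_middle.symm
      · have h0 : k.toNat = 0 := by omega
        rw [pickL, if_pos h, if_neg hk]
        have := ih k
        simp [h, h0] at this ⊢
        exact this
    · simp only [Bool.not_eq_true] at h
      rw [pickL, if_neg (by simp [h]), List.filter_cons, List.filter_cons]
      simpa [h] using (ih k).cons x

theorem pickL_sublist {α : Type} (p : α → Bool) (l : List α) (k : Int) :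
    (pickL p l k).Sublist l := by
  induction l generalizing k with
  | nil => simp [pickL]
  | cons x xs ih =>
    rw [pickL]
    by_cases h : p x = true
    · rw [if_pos h]
      by_cases hk : 0 < k
      · rw [if_pos hk]; exact (ih _).cons₂ x
      · rw [if_neg hk]; exact (ih _).cons x
    · rw [if_neg h]; exact (ih _).cons₂ x

theorem pickL_map {α β : Type} (p : β → Bool) (f : α → β) (l : List α) (k : Int) :
    (pickL (fun a => p (f a)) l k).map f = pickL p (l.map f) k := by
  induction l generalizing k with
  | nil => simp [pickL]
  | cons x xs ih =>
    by_cases h : p (f x) = true <;> by_cases hk : 0 < k <;>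
      simp [pickL, h, hk, ih]

-- the single forward pass of B computes pickL (with remaining budget = budget - kept)
theorem foldB (budget : Int) (z : List (List (String × String) × String))
    (acc1 : List (List (String × String))) (acc2 : List String) (kept : Int) :
    (z.foldl
      (fun (st : List (List (String × String)) × List String × Int) p =>
        if !(pvGetAT p.1 == some "flag_error") then (st.1 ++ [p.1], st.2.1 ++ [p.2], st.2.2)
        else if st.2.2 < budget then (st.1 ++ [p.1], st.2.1 ++ [p.2], st.2.2 + 1)
        else st)
      (acc1, acc2, kept)).1
      = acc1 ++ (pickL (fun p => pvGetAT p.1 == some "flag_error") z (budget - kept)).map Prod.fst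
    ∧ (z.foldl
      (fun (st : List (List (String × String)) × List String × Int) p =>
        if !(pvGetAT p.1 == some "flag_error") then (st.1 ++ [p.1], st.2.1 ++ [p.2], st.2.2)
        else if st.2.2 < budget then (st.1 ++ [p.1], st.2.1 ++ [p.2], st.2.2 + 1)
        else st)
      (acc1, acc2, kept)).2.1
      = acc2 ++ (pickL (fun p => pvGetAT p.1 == some "flag_error") z (budget - kept)).map Prod.snd := by
  induction z generalizing acc1 acc2 kept with
  | nil => simp [pickL]
  | cons p rest ih =>
    by_cases h : (pvGetAT p.1 == some "flag_error") = true
    · by_cases hb : kept < budget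
      · have h1 : 0 < budget - kept := by omega
        have h2 : budget - (kept + 1) = budget - kept - 1 := by omega
        obtain ⟨i1, i2⟩ := ih (acc1 ++ [p.1]) (acc2 ++ [p.2]) (kept + 1)
        rw [h2] at i1 i2
        rw [List.foldl_cons]
        simp only [h, Bool.not_true, Bool.false_eq_true, if_false, if_pos hb]
        rw [pickL, if_pos h, if_pos h1]
        exact ⟨by rw [i1]; simp, by rw [i2]; simp⟩
      · have h1 : ¬ 0 < budget - kept := by omega
        obtain ⟨i1, i2⟩ := ih acc1 acc2 kept
        rw [List.foldl_cons]
        simp only [h, Bool.not_true, Bool.false_eq_true, if_false, if_neg hb]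
        rw [pickL, if_pos h, if_neg h1]
        exact ⟨i1, i2⟩
    · obtain ⟨i1, i2⟩ := ih (acc1 ++ [p.1]) (acc2 ++ [p.2]) kept
      rw [List.foldl_cons]
      simp only [h, Bool.not_false, if_true]
      rw [pickL, if_neg h]
      exact ⟨by rw [i1]; simp, by rw [i2]; simp⟩

-- every "submit_report" item is a non-flag item
theorem report_sub_nonflag (l : List (Int × (List (String × String) × String))) :
    (l.filter (fun q => !(pvGetAT q.2.1 == some "flag_error"))).filter
        (fun q => pvGetAT q.2.1 == some "submit_report")
      = l.filter (fun q => pvGetAT q.2.1 == some "submit_report") := by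
  rw [List.filter_filter]
  apply List.filter_congr
  intro q _
  by_cases h : pvGetAT q.2.1 = some "submit_report" <;> simp [h]

theorem trim_eq (actions : List (List (String × String))) (traces : List String)
    (max_steps : Int) : trim_actions actions traces max_steps = trim_actions_alt actions traces max_steps := by
  unfold trim_actions trim_actions_alt
  by_cases hlen : (actions.length : Int) ≤ max_steps
  · simp [hlen]
  · simp only [hlen, if_false]
    set z := actions.zip traces with hz
    set e := PySem.List.enumerate z 0 with he
    set flagE : Int × (List (String × String) × String) → Bool :=
      fun q => pvGetAT q.2.1 == some "flag_error" with hflagE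
    set flagZ : List (String × String) × String → Bool :=
      fun p => pvGetAT p.1 == some "flag_error" with hflagZ
    set repE : Int × (List (String × String) × String) → Bool :=
      fun q => pvGetAT q.2.1 == some "submit_report" with hrepE
    -- names for A's intermediate lists
    set nf := e.filter (fun q => !flagE q) with hnf
    set fl := e.filter flagE with hfl
    set rp := e.filter repE with hrp
    set nfnr := nf.filter (fun q => !repE q) with hnfnr
    -- the two budgets agree
    have hsplit : rp = nf.filter repE := (report_sub_nonflag e).symm
    have hperm_nf : (nfnr ++ rp).Perm nf := by
      rw [hsplit, hnfnr]
      have := List.filter_append_perm (l := nf) (p := fun q => !repE q)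
      simpa using this
    have hlen_nf : nfnr.length + rp.length = nf.length := by
      simpa using hperm_nf.length_eq
    have hmapsnd : e.map Prod.snd = z := PySem.List.map_snd_enumerate z 0
    have hlen_zfilter : nf.length = (z.filter (fun p => !flagZ p)).length := by
      have h1 : (e.map Prod.snd).filter (fun p => !flagZ p) = nf.map Prod.snd := by
        rw [List.filter_map]; rfl
      have h2 := congrArg List.length h1
      rw [hmapsnd] at h2
      simp only [List.length_map] at h2
      omega
    set budget : Int := max_steps - (nfnr.length : Int) - (rp.length : Int) with hbudget
    have hbud2 : max_steps - (((z.filter (fun p => !(pvGetAT p.1 == some "flag_error"))).length : Int)) = budget := by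
      rw [hbudget]
      have : (z.filter (fun p => !flagZ p)).length = nfnr.length + rp.length := by
        rw [← hlen_zfilter]; omega
      simp only [hflagZ] at this
      rw [this]; push_cast; ring
    -- A's sorted combined list is pickL over the enumerated list
    have htrim : PySem.List.slice fl none (some (max 0 budget)) = fl.take budget.toNat := by
      rw [PySem.List.slice_to (b := max 0 budget) fl (by omega)]
      congr 1; omega
    have hsorted : PySem.List.sorted (nfnr ++ PySem.List.slice fl none (some (max 0 budget)) ++ rp)
        (fun q => q.1) false = pickL flagE e budget := by
      apply PySem.List.sorted_eq_of_perm_of_pairwise_lt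
      · -- permutation
        have h1 : (pickL flagE e budget).Perm (nf ++ fl.take budget.toNat) := by
          simpa [hnf, hfl] using pickL_perm flagE e budget
        apply h1.trans
        rw [htrim]
        have step1 : (nf ++ fl.take budget.toNat).Perm (nfnr ++ rp ++ fl.take budget.toNat) :=
          hperm_nf.symm.append_right _
        have step2 : (nfnr ++ rp ++ fl.take budget.toNat).Perm (nfnr ++ (fl.take budget.toNat ++ rp)) := by
          rw [List.append_assoc]
          exact List.perm_append_comm.append_left nfnr
        simpa [List.append_assoc] using step1.trans step2
      · -- strictly increasing indices
        exact List.Pairwise.sublist (pickL_sublist flagE e budget) (PySem.List.pairwise_lt_enumerate z 0)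
    rw [hsorted]
    -- B's fold result
    have hfold := foldB budget z [] [] 0
    have hz0 : budget - 0 = budget := by omega
    rw [hz0] at hfold
    have hmap : (pickL flagE e budget).map Prod.snd = pickL flagZ z budget := by
      have := pickL_map flagZ Prod.snd e budget
      rw [hmapsnd] at this
      simpa [hflagE, hflagZ] using this
    rw [hbud2]
    refine Prod.ext ?_ ?_
    · rw [hfold.1]
      simp only [List.nil_append]
      calc (pickL flagE e budget).map (fun q => q.2.1)
          = ((pickL flagE e budget).map Prod.snd).map Prod.fst := by rw [List.map_map]; rfl
        _ = (pickL flagZ z budget).map Prod.fst := by rw [hmap]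
        _ = (pickL (fun p => pvGetAT p.1 == some "flag_error") z budget).map Prod.fst := rfl
    · rw [hfold.2]
      simp only [List.nil_append]
      calc (pickL flagE e budget).map (fun q => q.2.2)
          = ((pickL flagE e budget).map Prod.snd).map Prod.snd := by rw [List.map_map]; rfl
        _ = (pickL flagZ z budget).map Prod.snd := by rw [hmap]
        _ = (pickL (fun p => pvGetAT p.1 == some "flag_error") z budget).map Prod.snd := rfl

-- ===== VERDICT (by name: the statement is the Claim_ definition above) =====
theorem trim_actions_spec : Claim_equal_trim_actions := by
  intro actions traces max_steps _
  exact trim_eq actions traces max_steps
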